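-- pv_equiv track=rewrite | github.com/hchung1/cs451-551-analytics-engine | data/doctest_homework.py | grade_avg
-- ===== SOURCE A (Python) =====
-- def grade_avg(midterm, final):
-- 	"""
-- 	>>> grade_avg(['F', 'C', 'A', 'B', 'B', 'C', 'B', 'D', 'C', 'B', 'F', 'B', 'A', 'F', 'A', 'A', 'B', 'A', 'C', 'A', 'B', 'C', 'A', 'B', 'B', 'A', 'C', 'A', 'C', 'C', 'A', 'B', 'C', 'F', 'B', 'A', 'C', 'A', 'C', 'B', 'B', 'D', 'A', 'C', 'C', 'B', 'A', 'A', 'B', 'C', 'C', 'A', 'C', 'A', 'A', 'A', 'A', 'C', 'A', 'A', 'B', 'C', 'F', 'B', 'C', 'B', 'B', 'A', 'F', 'A', 'B', 'B', 'C', 'C', 'A', 'A', 'A', 'C', 'D', 'B', 'A', 'C', 'C', 'B', 'A', 'B', 'C', 'B', 'B'], ['F', 'B', 'A', 'A', 'B', 'A', 'A', 'B', 'F', 'A', 'F', 'B', 'A', 'F', 'A', 'A', 'B', 'A', 'B', 'A', 'A', 'A', 'A', 'B', 'B', 'A', 'B', 'A', 'B', 'C', 'A', 'C', 'D', 'F',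 'A', 'A', 'C', 'A', 'D', 'B', 'A', 'C', 'A', 'C', 'C', 'A', 'A', 'A', 'A', 'C', 'B', 'A', 'F', 'A', 'B', 'A', 'A', 'A', 'B', 'A', 'C', 'C', 'C', 'A', 'C', 'B', 'C', 'A', 'B', 'A', 'B', 'B', 'A', 'B', 'B', 'A', 'A', 'C', 'B', 'A', 'A', 'B', 'B', 'A', 'A', 'B', 'B', 'A', 'A'])
-- 	('C', 'B')
-- 	"""
-- 	points = {'A':5,'B':4,'C':3,'D':2,'F':1}
-- 	average = {5:'A',4:'B',3:'C',2:'D',1:'F'}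
-- 	count_m = 0
-- 	count_f = 0
-- 	for i in  range(len(midterm)):
-- 		count_m += points[midterm[i]]
-- 		count_f += points[final[i]]
-- 	count_m = average[int(count_m/len(midterm))]
-- 	count_f = average[int(count_f/len(final))]
-- 	return count_m, count_f
-- ===== SOURCE B (Python) =====
-- def grade_avg(midterm, final):
-- 	def letter_avg(grades):
-- 		freq = {}
-- 		for g in grades:
-- 			freq[g] = freq.get(g, 0) + 1
-- 		total = sum((i + 1) * freq.get(l, 0) for i, l in enumerate('FDCBA'))
-- 		n = len(grades)
-- 		k = max([k for k in range(1, 6) if k * n <= total])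
-- 		return 'FDCBA'[k - 1]
-- 	return letter_avg(midterm), letter_avg(final)
-- ===== Notes on version B (the rewrite author's own statement) =====
-- stated objective: alternative
-- what changed: B builds a frequency dict per list in one pass, computes the point total as a weighted sum over the five letters of 'FDCBA' via enumerate, and picks the letter without any division by taking the largest threshold k in 1..5 with k*len <= total, indexing 'FDCBA' instead of A's per-element points-dict loop and average-dict lookup on int(total/len).
-- outside the precondition, e.g. on grade_avg(['A'], ['A', 'A', 'A', 'A', 'A']): A returns ('A', 'F'), B returns ('A', 'A')
import Mathlib
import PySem

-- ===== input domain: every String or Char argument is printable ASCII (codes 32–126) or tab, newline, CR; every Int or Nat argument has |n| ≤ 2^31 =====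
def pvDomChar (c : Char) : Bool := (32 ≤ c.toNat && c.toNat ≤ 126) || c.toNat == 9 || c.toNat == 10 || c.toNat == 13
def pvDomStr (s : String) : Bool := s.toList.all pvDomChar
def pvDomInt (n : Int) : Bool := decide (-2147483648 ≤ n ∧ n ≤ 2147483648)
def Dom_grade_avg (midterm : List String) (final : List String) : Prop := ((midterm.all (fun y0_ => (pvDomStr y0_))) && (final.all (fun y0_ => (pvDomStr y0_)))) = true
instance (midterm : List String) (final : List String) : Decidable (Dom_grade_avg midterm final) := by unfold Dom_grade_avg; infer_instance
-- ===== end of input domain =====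

-- B replaces A's per-element points-dict loop and average-dict lookup by a frequency dict
-- built once per list, a weighted sum over the five letters of 'FDCBA', and a threshold
-- search (largest k with k*len <= total) instead of division (objective: alternative).

-- ===== PORT A =====
def gaPoints : PySem.Dict String Int :=
  PySem.Dict.ofList [("A", 5), ("B", 4), ("C", 3), ("D", 2), ("F", 1)]

def gaAverage : PySem.Dict Int String :=
  PySem.Dict.ofList [((5 : Int), "A"), (4, "B"), (3, "C"), (2, "D"), (1, "F")]

-- Inside Pre_ every dict lookup succeeds and every index is in range, so getD/pyGetD
-- defaults are never reached; int(count/len) on these nonnegative exact values is floor division.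
def grade_avg (midterm : List String) (final : List String) : String × String :=
  let cc : Int × Int :=
    (PySem.List.pyRange 0 (midterm.length : Int) 1).foldl
      (fun (acc : Int × Int) i =>
        (acc.1 + gaPoints.getD (PySem.List.pyGetD midterm i "") 0,
         acc.2 + gaPoints.getD (PySem.List.pyGetD final i "") 0)) (0, 0)
  (gaAverage.getD (PySem.Int.floordiv cc.1 (midterm.length : Int)) "",
   gaAverage.getD (PySem.Int.floordiv cc.2 (final.length : Int)) "")

-- ===== PORT B =====
-- max([...]) raises on an empty list in Python; inside Pre_ the candidate list always
-- contains 1, so the none branch ("") is never reached. 'FDCBA'[k-1] is a one-char str.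
def gbLetterAvg (grades : List String) : String :=
  let freq : PySem.Dict String Int :=
    grades.foldl (fun d g => d.insert g (d.getD g 0 + 1)) PySem.Dict.empty
  let total : Int :=
    ((PySem.List.enumerate ("FDCBA".toList)).map
      (fun p => (p.1 + 1) * freq.getD (String.ofList [p.2]) 0)).sum
  let n : Int := (grades.length : Int)
  match PySem.List.max? ((PySem.List.pyRange 1 6 1).filter (fun k => decide (k * n ≤ total))) (fun x => x) with
  | some k =>
    match PySem.Str.pyGet? "FDCBA" (k - 1) with
    | some c => String.ofList [c]
    | none => ""
  | none => ""

def grade_avg_alt (midterm : List String) (final : List String) : String × String :=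
  (gbLetterAvg midterm, gbLetterAvg final)

-- ===== PRECONDITION & SPEC =====
-- Pre_ excludes inputs on which A raises (empty lists: ZeroDivisionError; letters outside
-- A–D/F: KeyError; final shorter than midterm: IndexError) and mismatched-length inputs,
-- on which A's value — a sum over only a prefix of final divided by final's full length —
-- is an unspecified corner of the paired-lists task that no caller would rely on.
def Pre_grade_avg (midterm : List String) (final : List String) : Prop :=
  midterm ≠ [] ∧ final ≠ [] ∧ midterm.length = final.length ∧
  (∀ g ∈ midterm, g ∈ (["A", "B", "C", "D", "F"] : List String)) ∧
  (∀ g ∈ final, g ∈ (["A", "B", "C", "D", "F"] : List String))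
instance (midterm : List String) (final : List String) : Decidable (Pre_grade_avg midterm final) := by
  unfold Pre_grade_avg; infer_instance

def pvWitness_grade_avg : List String × List String := (["A", "C", "B"], ["B", "B", "F"])

def Spec_grade_avg (midterm : List String) (final : List String) (out : String × String) : Prop :=
  out = grade_avg_alt midterm final
instance (midterm : List String) (final : List String) (out : String × String) : Decidable (Spec_grade_avg midterm final out) := by
  unfold Spec_grade_avg; infer_instance

-- ===== CLAIM (what is proved, stated in full; the proofs are below) =====
def Claim_equal_grade_avg : Prop := ∀ (midterm : List String) (final : List String), Dom_grade_avg midterm final → Pre_grade_avg midterm final → Spec_grade_avg midterm final (grade_avg midterm final)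

-- ===== LEMMAS AND PROOFS =====

-- A's per-element point sum equals the weighted letter-count sum, on lists of valid letters.
lemma ga_sum_eq_counts (xs : List String)
    (h : ∀ g ∈ xs, g ∈ (["A", "B", "C", "D", "F"] : List String)) :
    xs.foldl (fun a g => a + gaPoints.getD g 0) 0 =
      5 * (xs.count "A" : Int) + 4 * (xs.count "B" : Int)
        + 3 * (xs.count "C" : Int) + 2 * (xs.count "D" : Int)
        + (xs.count "F" : Int) := by
  have e1 : gaPoints.getD "A" 0 = 5 := by decide
  have e2 : gaPoints.getD "B" 0 = 4 := by decide
  have e3 : gaPoints.getD "C" 0 = 3 := by decide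
  have e4 : gaPoints.getD "D" 0 = 2 := by decide
  have e5 : gaPoints.getD "F" 0 = 1 := by decide
  rw [PySem.List.foldl_add]
  induction xs with
  | nil => simp
  | cons a xs ih =>
    have ha := h a (List.mem_cons_self)
    have ih' := ih (fun g hg => h g (List.mem_cons_of_mem a hg))
    fin_cases ha <;>
      · simp only [List.map_cons, List.sum_cons, List.count_cons, e1, e2, e3, e4, e5] at *
        norm_num at *
        omega

lemma ga_counts_len (xs : List String)
    (h : ∀ g ∈ xs, g ∈ (["A", "B", "C", "D", "F"] : List String)) :
    (xs.count "A" : Int) + (xs.count "B" : Int) + (xs.count "C" : Int)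
      + (xs.count "D" : Int) + (xs.count "F" : Int) = (xs.length : Int) := by
  induction xs with
  | nil => simp
  | cons a xs ih =>
    have ha := h a (List.mem_cons_self)
    have ih' := ih (fun g hg => h g (List.mem_cons_of_mem a hg))
    fin_cases ha <;>
      · simp only [List.count_cons, List.length_cons] at *
        norm_num at *
        omega

-- B's weighted enumerate-sum over the frequency dict is the same weighted count sum.
lemma gb_total_eq_counts (xs : List String) :
    ((PySem.List.enumerate ("FDCBA".toList)).map
      (fun p => (p.1 + 1) *
        (xs.foldl (fun d g => d.insert g (d.getD g 0 + 1)) PySem.Dict.empty).getD (String.ofList [p.2]) 0)).sum =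
      5 * (xs.count "A" : Int) + 4 * (xs.count "B" : Int)
        + 3 * (xs.count "C" : Int) + 2 * (xs.count "D" : Int)
        + (xs.count "F" : Int) := by
  rw [PySem.Dict.foldl_insert_getD_add_one_eq_counter]
  have he : PySem.List.enumerate ("FDCBA".toList) =
      [(0, 'F'), (1, 'D'), (2, 'C'), (3, 'B'), (4, 'A')] := by decide
  rw [he]
  simp only [List.map_cons, List.map_nil, List.sum_cons, List.sum_nil,
    PySem.Dict.getD_counter]
  norm_num
  ring

-- the threshold search over [1..5] returns exactly the floor average, when it lies in [1,5]
lemma gb_select (total n : Int) (hn : 0 < n)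
    (hq1 : 1 ≤ PySem.Int.floordiv total n) (hq5 : PySem.Int.floordiv total n ≤ 5) :
    PySem.List.max? ((PySem.List.pyRange 1 6 1).filter (fun k => decide (k * n ≤ total))) (fun x => x)
      = some (PySem.Int.floordiv total n) := by
  have hfc : ∀ k ∈ PySem.List.pyRange 1 6 1,
      decide (k * n ≤ total) = decide (k ≤ PySem.Int.floordiv total n) := by
    intro k _
    rw [decide_eq_decide]
    exact (PySem.Int.le_floordiv_iff_mul_le hn).symm
  rw [List.filter_congr hfc]
  generalize PySem.Int.floordiv total n = q at *
  interval_cases q <;> decide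

-- dict lookup of the truncated average = B's threshold-selected letter from 'FDCBA'
lemma gb_table (q : Int) (h1 : 1 ≤ q) (h5 : q ≤ 5) :
    gaAverage.getD q "" =
      (match PySem.Str.pyGet? "FDCBA" (q - 1) with
       | some c => String.ofList [c]
       | none => "") := by
  interval_cases q <;> decide

-- one-list side: A's dict lookup of the truncated average = B's letter-average
lemma ga_side (xs : List String) (hne : xs ≠ [])
    (h : ∀ g ∈ xs, g ∈ (["A", "B", "C", "D", "F"] : List String)) :
    gaAverage.getD (PySem.Int.floordiv (xs.foldl (fun a g => a + gaPoints.getD g 0) 0) (xs.length : Int)) ""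
      = gbLetterAvg xs := by
  have hn : 0 < (xs.length : Int) := by
    have := List.length_pos_iff.mpr hne; exact_mod_cast this
  have hs := ga_sum_eq_counts xs h
  have hl := ga_counts_len xs h
  have hA : (0 : Int) ≤ (xs.count "A" : Int) := Int.natCast_nonneg _
  have hB : (0 : Int) ≤ (xs.count "B" : Int) := Int.natCast_nonneg _
  have hC : (0 : Int) ≤ (xs.count "C" : Int) := Int.natCast_nonneg _
  have hD : (0 : Int) ≤ (xs.count "D" : Int) := Int.natCast_nonneg _
  have hF : (0 : Int) ≤ (xs.count "F" : Int) := Int.natCast_nonneg _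
  set S : Int := xs.foldl (fun a g => a + gaPoints.getD g 0) 0 with hS
  have hlb : (xs.length : Int) ≤ S := by omega
  have hub : S ≤ 5 * (xs.length : Int) := by omega
  have hq1 : 1 ≤ PySem.Int.floordiv S (xs.length : Int) :=
    (PySem.Int.le_floordiv_iff_mul_le hn).mpr (by omega)
  have hq5 : PySem.Int.floordiv S (xs.length : Int) ≤ 5 := by
    have h6 : PySem.Int.floordiv S (xs.length : Int) < 6 :=
      (PySem.Int.floordiv_lt_iff_lt_mul hn).mpr (by omega)
    omega
  unfold gbLetterAvg
  simp only []
  rw [gb_total_eq_counts, ← hs, gb_select S (xs.length : Int) hn hq1 hq5]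
  exact gb_table _ hq1 hq5

-- ===== VERDICT (by name: the statement is the Claim_ definition above) =====
theorem grade_avg_spec : Claim_equal_grade_avg := by
  intro midterm final _ hpre
  obtain ⟨hm, hf, hlen, hall_m, hall_f⟩ := hpre
  unfold Spec_grade_avg grade_avg grade_avg_alt
  simp only []
  rw [PySem.List.foldl_prod_mk
        (f := fun a i => a + gaPoints.getD (PySem.List.pyGetD midterm i "") 0)
        (g := fun a i => a + gaPoints.getD (PySem.List.pyGetD final i "") 0)]
  rw [hlen]
  rw [PySem.List.foldl_pyRange_zero_pyGetD' final "" (fun a g => a + gaPoints.getD g 0) 0]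
  have hrw : PySem.List.pyRange 0 (final.length : Int) 1 = PySem.List.pyRange 0 (midterm.length : Int) 1 := by rw [hlen]
  rw [hrw, PySem.List.foldl_pyRange_zero_pyGetD' midterm "" (fun a g => a + gaPoints.getD g 0) 0]
  refine Prod.ext ?_ ?_
  · show gaAverage.getD (PySem.Int.floordiv (midterm.foldl (fun a g => a + gaPoints.getD g 0) 0) (final.length : Int)) "" = gbLetterAvg midterm
    rw [← hlen]
    exact ga_side midterm hm hall_m
  · exact ga_side final hf hall_f
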